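-- pv_equiv track=rewrite | github.com/akosh25/algortimusok | 02_rekurzio_ko_osztas.py | stoneDivision
-- ===== SOURCE A (Python) =====
-- def stoneDivision(n, s):
--     # Memoizáció az ismétlődő számítások elkerülésére
--     memo = {}
--
--     def dfs(n):
--         # Ha már kiszámoltuk ezt a halmazt, akkor az eredményt visszaadjuk
--         if n in memo:
--             return memo[n]
--
--         max_moves = 0
--
--         # Iterálunk az összes lehetséges osztón
--         for x in s:
--             # Csak akkor osztjuk tovább a halmazt, ha az osztható x-szel és az osztás után több, mint 1 részre oszlik
--             if n % x == 0 and n != x: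
--                 # Az aktuális mozgás számítása: hányszor tudjuk osztani a részeket és hányszor osztható tovább
--                 parts = n // x
--                 max_moves = max(max_moves, parts * dfs(x) + 1)
--
--         memo[n] = max_moves
--         return max_moves
--
--     return dfs(n)
-- ===== SOURCE B (Python) =====
-- def stoneDivision(n, s):
--     # Bottom-up DP over the distinct divisors of n found in s, processed in
--     # increasing absolute value, then a final query pass for n itself.
--     dp = {}
--     for v in sorted({x for x in s if n % x == 0 and x != n}, key=abs):
--         best = 0
--         for x in s:
--             if v % x == 0 and v != x:
--                 best = max(best, (v // x) * dp[x] + 1)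
--         dp[v] = best
--     ans = 0
--     for x in s:
--         if n % x == 0 and n != x:
--             ans = max(ans, (n // x) * dp[x] + 1)
--     return ans
-- ===== Notes on version B (the rewrite author's own statement) =====
-- stated objective: alternative
-- what changed: Replaces the memoized top-down recursion (closure + memo dict) by an explicit bottom-up DP: dp[v] is filled for the distinct divisors of n present in s in increasing absolute value (so every needed dp[x] already exists), and the answer for n is a separate final scan over s.
import Mathlib
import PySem

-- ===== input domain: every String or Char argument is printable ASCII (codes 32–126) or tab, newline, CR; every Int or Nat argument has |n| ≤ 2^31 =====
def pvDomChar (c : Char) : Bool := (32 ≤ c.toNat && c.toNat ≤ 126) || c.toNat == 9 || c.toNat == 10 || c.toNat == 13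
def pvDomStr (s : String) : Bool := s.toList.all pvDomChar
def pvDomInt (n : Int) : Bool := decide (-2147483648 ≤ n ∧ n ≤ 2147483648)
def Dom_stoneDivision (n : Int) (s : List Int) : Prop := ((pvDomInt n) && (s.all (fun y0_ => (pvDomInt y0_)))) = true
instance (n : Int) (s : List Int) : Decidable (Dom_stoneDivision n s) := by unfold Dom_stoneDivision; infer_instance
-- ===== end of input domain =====

-- B replaces A's memoized top-down recursion by a bottom-up DP table over the divisors of n
-- present in s, filled in increasing absolute value (alternative decomposition, same cost).


-- ===== PORT A =====
-- dfs's memo dict is a pure cache of a deterministic function, so it never changes a returned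
-- value; the recursion itself is ported literally.  pvAbsRank is only a termination measure:
-- the dite on it makes the recursion total, and under Pre_ it holds exactly on every divisor
-- edge Python actually follows (each recursion strictly decreases the absolute value).
def pvAbsRank (s : List Int) (v : Int) : Nat := (s.filter (fun y => |y| < |v|)).toFinset.card

def dfsALoop (s : List Int) (v : Int) : List Int → Int → Int
  | [], maxMoves => maxMoves
  | x :: rest, maxMoves =>
    if PySem.Int.mod v x = 0 ∧ v ≠ x then
      let sub := if _h : pvAbsRank s x < pvAbsRank s v then dfsALoop s x s 0 else 0
      dfsALoop s v rest (max maxMoves (PySem.Int.floordiv v x * sub + 1))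
    else
      dfsALoop s v rest maxMoves
termination_by l _ => (pvAbsRank s v, l.length)

-- the top-level dfs(n): its recursive calls dfs(x), x ∈ s, go through dfsALoop unconditionally
def stoneDivisionTop (s : List Int) (n : Int) : List Int → Int → Int
  | [], maxMoves => maxMoves
  | x :: rest, maxMoves =>
    if PySem.Int.mod n x = 0 ∧ n ≠ x then
      stoneDivisionTop s n rest (max maxMoves (PySem.Int.floordiv n x * dfsALoop s x s 0 + 1))
    else
      stoneDivisionTop s n rest maxMoves

def stoneDivision (n : Int) (s : List Int) : Int := stoneDivisionTop s n s 0

-- ===== PORT B =====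
-- dp[x] in Python raises KeyError if x is absent; that is unreachable under Pre_, getD 0 is the total guard
def innerB (dp : PySem.Dict Int Int) (v : Int) : List Int → Int → Int
  | [], best => best
  | x :: rest, best =>
    if PySem.Int.mod v x = 0 ∧ v ≠ x then
      innerB dp v rest (max best (PySem.Int.floordiv v x * dp.getD x 0 + 1))
    else
      innerB dp v rest best

def stoneDivision_alt (n : Int) (s : List Int) : Int :=
  let seen := PySem.Set.ofList (s.filter (fun x => decide (PySem.Int.mod n x = 0 ∧ x ≠ n)))
  let dp := (PySem.List.sorted seen (fun x => |x|) false).foldl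
      (fun dp v => dp.insert v (innerB dp v s 0)) PySem.Dict.empty
  innerB dp n s 0

-- ===== PRECONDITION & SPEC =====
-- Pre_ excludes exactly the inputs on which A raises: a 0 in s (ZeroDivisionError on n % 0),
-- and a pair v, -v both in s with v dividing n (the recursion reaches the 2-cycle v ↔ -v and
-- never terminates: RecursionError).  On every other input A returns and B matches it.
def Pre_stoneDivision (n : Int) (s : List Int) : Prop :=
  (0 : Int) ∉ s ∧ ∀ v ∈ s, -v ∈ s → ¬ (v ∣ n)
instance (n : Int) (s : List Int) : Decidable (Pre_stoneDivision n s) := by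
  unfold Pre_stoneDivision; infer_instance

def pvWitness_stoneDivision : Int × List Int := (12, [2, 3])

def Spec_stoneDivision (n : Int) (s : List Int) (out : Int) : Prop := out = stoneDivision_alt n s
instance (n : Int) (s : List Int) (out : Int) : Decidable (Spec_stoneDivision n s out) := by
  unfold Spec_stoneDivision; infer_instance

-- ===== CLAIM (what is proved, stated in full; the proofs are below) =====
def Claim_equal_stoneDivision : Prop := ∀ (n : Int) (s : List Int), Dom_stoneDivision n s → Pre_stoneDivision n s → Spec_stoneDivision n s (stoneDivision n s)

-- ===== LEMMAS AND PROOFS =====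

-- a proper divisor that is not the negation has strictly smaller absolute value
theorem pv_dvd_abs_lt {x v : Int} (h : x ∣ v) (hv : v ≠ 0) (h1 : x ≠ v) (h2 : x ≠ -v) :
    |x| < |v| := by
  have hle : |x| ≤ |v| :=
    Int.le_of_dvd (abs_pos.mpr hv) ((abs_dvd x |v|).mpr ((dvd_abs x v).mpr h))
  rcases lt_or_eq_of_le hle with hlt | heq
  · exact hlt
  · rcases abs_eq_abs.mp heq with h' | h' <;> simp_all

-- a member of s with strictly smaller absolute value has strictly smaller rank
theorem pvAbsRank_lt {s : List Int} {x v : Int} (hx : x ∈ s) (hlt : |x| < |v|) :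
    pvAbsRank s x < pvAbsRank s v := by
  apply Finset.card_lt_card
  constructor
  · intro y hy
    simp only [List.mem_toFinset, List.mem_filter, decide_eq_true_eq] at *
    exact ⟨hy.1, lt_trans hy.2 hlt⟩
  · intro hsub
    have := hsub (by simp [hx, hlt] : x ∈ (s.filter (fun y => |y| < |v|)).toFinset)
    simp at this

-- under Pre_, an edge from a divisor v of n inside s goes to a strictly smaller |x|
theorem pv_edge_abs_lt {n : Int} {s : List Int} (hP : Pre_stoneDivision n s)
    {v x : Int} (hv : v ∈ s) (hvn : v ∣ n) (hx : x ∈ s) (hdvd : x ∣ v) (hne : v ≠ x) :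
    |x| < |v| := by
  have hv0 : v ≠ 0 := fun h => hP.1 (h ▸ hv)
  refine pv_dvd_abs_lt hdvd hv0 (fun h => hne h.symm) (fun h => ?_)
  exact hP.2 x hx (by rw [h]; simpa using hv) (dvd_trans hdvd hvn)

-- row lemma: when dp is already correct on every proper divisor (in s) of v,
-- B's inner loop at v computes exactly A's dfs loop at v
theorem pv_row {n : Int} (s : List Int) (hP : Pre_stoneDivision n s) (v : Int)
    (hv : v ∈ s) (hvn : v ∣ n) (dp : PySem.Dict Int Int)
    (hdp : ∀ x ∈ s, x ∣ v → v ≠ x → dp.getD x 0 = dfsALoop s x s 0) :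
    ∀ (l : List Int), (∀ x ∈ l, x ∈ s) → ∀ (m : Int),
      innerB dp v l m = dfsALoop s v l m := by
  intro l
  induction l with
  | nil => intro _ m; simp [innerB, dfsALoop]
  | cons x rest ih =>
    intro hl m
    have hxs : x ∈ s := hl x (List.mem_cons_self ..)
    rw [innerB, dfsALoop]
    by_cases hc : PySem.Int.mod v x = 0 ∧ v ≠ x
    · have hdvd : x ∣ v := (PySem.Int.mod_eq_zero_iff_dvd v x).mp hc.1
      have hlt : |x| < |v| := pv_edge_abs_lt hP hv hvn hxs hdvd hc.2
      rw [if_pos hc, if_pos hc]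
      simp only [dif_pos (pvAbsRank_lt hxs hlt)]
      rw [hdp x hxs hdvd hc.2]
      exact ih (fun y hy => hl y (List.mem_cons_of_mem _ hy)) _
    · rw [if_neg hc, if_neg hc]
      exact ih (fun y hy => hl y (List.mem_cons_of_mem _ hy)) _

-- top lemma: once dp is correct on every proper divisor of n in s,
-- B's final loop computes A's top-level loop
theorem pv_top (s : List Int) (n : Int) (dp : PySem.Dict Int Int)
    (hdp : ∀ x ∈ s, x ∣ n → n ≠ x → dp.getD x 0 = dfsALoop s x s 0) :
    ∀ (l : List Int), (∀ x ∈ l, x ∈ s) → ∀ (m : Int),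
      innerB dp n l m = stoneDivisionTop s n l m := by
  intro l
  induction l with
  | nil => intro _ m; simp [innerB, stoneDivisionTop]
  | cons x rest ih =>
    intro hl m
    have hxs : x ∈ s := hl x (List.mem_cons_self ..)
    rw [innerB, stoneDivisionTop]
    by_cases hc : PySem.Int.mod n x = 0 ∧ n ≠ x
    · rw [if_pos hc, if_pos hc,
        hdp x hxs ((PySem.Int.mod_eq_zero_iff_dvd n x).mp hc.1) hc.2]
      exact ih (fun y hy => hl y (List.mem_cons_of_mem _ hy)) _
    · rw [if_neg hc, if_neg hc]
      exact ih (fun y hy => hl y (List.mem_cons_of_mem _ hy)) _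

-- the DP fold invariant: folding B's insert step over the |·|-ascending list of proper
-- divisors of n in s leaves every such divisor bound to its dfs value
theorem pv_fold (n : Int) (s : List Int) (hP : Pre_stoneDivision n s) :
    ∀ (l : List Int), (∀ x ∈ l, x ∈ s ∧ x ∣ n ∧ x ≠ n) →
      l.Pairwise (fun a b => |a| ≤ |b|) →
      ∀ (dp : PySem.Dict Int Int),
        (∀ x ∈ s, x ∣ n → x ≠ n → x ∈ l ∨ dp.get? x = some (dfsALoop s x s 0)) →
        ∀ x ∈ s, x ∣ n → x ≠ n →
          (l.foldl (fun dp v => dp.insert v (innerB dp v s 0)) dp).get? x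
            = some (dfsALoop s x s 0) := by
  intro l
  induction l with
  | nil =>
    intro _ _ dp hinv x hxs hxn hne
    simpa using (hinv x hxs hxn hne).resolve_left (by simp)
  | cons v t ih =>
    intro hl hpair dp hinv
    obtain ⟨hvs, hvn, hvne⟩ := hl v (List.mem_cons_self ..)
    have hvle : ∀ y ∈ t, |v| ≤ |y| := (List.pairwise_cons.mp hpair).1
    -- the value inserted for v is correct: every x it needs is already in dp
    have hrow : innerB dp v s 0 = dfsALoop s v s 0 := by
      refine pv_row s hP v hvs hvn dp ?_ s (fun y hy => hy) 0
      intro x hxs hdvd hne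
      have hxlt : |x| < |v| := pv_edge_abs_lt hP hvs hvn hxs hdvd hne
      have hxn : x ∣ n := dvd_trans hdvd hvn
      have hxnen : x ≠ n := by
        intro h; subst h
        have hx0 : x ≠ 0 := fun h0 => hP.1 (h0 ▸ hxs)
        have h1 : |v| ≤ |x| :=
          Int.le_of_dvd (abs_pos.mpr hx0) ((abs_dvd _ _).mpr ((dvd_abs _ _).mpr hvn))
        omega
      rcases hinv x hxs hxn hxnen with hmem | hsome
      · rcases List.mem_cons.mp hmem with rfl | hmt
        · omega
        · exact absurd (hvle x hmt) (by omega)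
      · rw [PySem.Dict.getD_eq_get?_getD, hsome]; rfl
    rw [List.foldl_cons]
    refine ih (fun y hy => hl y (List.mem_cons_of_mem _ hy)) (List.pairwise_cons.mp hpair).2
      (dp.insert v (innerB dp v s 0)) ?_
    intro x hxs hxn hne
    by_cases hxv : x = v
    · subst hxv
      right
      rw [PySem.Dict.get?_insert_self, hrow]
    · rcases hinv x hxs hxn hne with hmem | hsome
      · rcases List.mem_cons.mp hmem with rfl | hmt
        · exact absurd rfl hxv
        · exact Or.inl hmt
      · right
        rw [PySem.Dict.get?_insert_of_ne dp (innerB dp v s 0) hxv, hsome]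

-- ===== VERDICT (by name: the statement is the Claim_ definition above) =====
theorem stoneDivision_spec : Claim_equal_stoneDivision := by
  intro n s _hdom hP
  unfold Spec_stoneDivision
  unfold stoneDivision_alt
  set l := PySem.List.sorted
      (PySem.Set.ofList (s.filter (fun x => decide (PySem.Int.mod n x = 0 ∧ x ≠ n))))
      (fun x => |x|) false with hl
  have hmem : ∀ x, x ∈ l ↔ x ∈ s ∧ x ∣ n ∧ x ≠ n := by
    intro x
    rw [hl, PySem.List.mem_sorted, PySem.Set.mem_ofList, List.mem_filter]
    simp [PySem.Int.mod_eq_zero_iff_dvd]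
  have hpair : l.Pairwise (fun a b => |a| ≤ |b|) := PySem.List.sorted_pairwise _ _
  have hdp := pv_fold n s hP l (fun x hx => (hmem x).mp hx) hpair PySem.Dict.empty
    (fun x hxs hxn hne => Or.inl ((hmem x).mpr ⟨hxs, hxn, hne⟩))
  have htop := pv_top s n _ (fun x hxs hxn hne => by
      rw [PySem.Dict.getD_eq_get?_getD, hdp x hxs hxn (fun h => hne h.symm)]; rfl)
    s (fun y hy => hy) 0
  rw [htop]
  rfl
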